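-- pv_equiv track=rewrite | github.com/pypi-data/pypi-mirror-404 | packages/mkdocs-mermaid-to-svg/mkdocs_mermaid_to_svg-1.2.2-py3-none-any.whl/mkdocs_mermaid_to_svg/image_generator.py | _detect_mermaid_type
-- ===== SOURCE A (Python) =====
-- def _detect_mermaid_type(mermaid_code: str) -> str:
--     """Mermaidコードの先頭から図種を推定する"""
--     first_line = ""
--     for line in mermaid_code.splitlines():
--         stripped = line.strip()
--         if stripped and not stripped.startswith("%%"):
--             first_line = stripped
--             break
--
--     header = first_line.lower()
--     if header.startswith("sequencediagram"):
--         return "sequence"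
--     if header.startswith("classdiagram"):
--         return "class"
--     if header.startswith("erdiagram"):
--         return "er"
--     if header.startswith("statediagram"):
--         return "state"
--     if header.startswith("graph") or header.startswith("flowchart"):
--         return "flowchart"
--     return "unknown"
-- ===== SOURCE B (Python) =====
-- _KIND_BY_HEADER = {
--     "sequencediagram": "sequence",
--     "classdiagram": "class",
--     "erdiagram": "er",
--     "statediagram": "state",
--     "graph": "flowchart",
--     "flowchart": "flowchart",
-- }
-- _PREFIX_LENGTHS = (5, 9, 12, 15)
--
--
-- def _detect_mermaid_type(mermaid_code: str) -> str:
--     """Exact-match dict lookup on the four possible prefix lengths.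
--
--     Correct because the six recognised headers are prefix-free (none is a
--     prefix of another), so at most one slice length can match and the
--     ordered startswith cascade is unnecessary.
--     """
--     meaningful = [s for s in (ln.strip() for ln in mermaid_code.splitlines())
--                   if s and not s.startswith("%%")]
--     header = (meaningful[0] if meaningful else "").lower()
--     for n in _PREFIX_LENGTHS:
--         kind = _KIND_BY_HEADER.get(header[:n])
--         if kind is not None:
--             return kind
--     return "unknown"
-- ===== Notes on version B (the rewrite author's own statement) =====
-- stated objective: alternative
-- what changed: Classification is an exact-match dictionary lookup on the four possible prefix lengths (valid because the six recognised headers are prefix-free), replacing A's ordered startswith cascade; the first meaningful line comes from a staged strip/filter list comprehension with head-or-default instead of A's break-loop.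
import Mathlib
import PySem

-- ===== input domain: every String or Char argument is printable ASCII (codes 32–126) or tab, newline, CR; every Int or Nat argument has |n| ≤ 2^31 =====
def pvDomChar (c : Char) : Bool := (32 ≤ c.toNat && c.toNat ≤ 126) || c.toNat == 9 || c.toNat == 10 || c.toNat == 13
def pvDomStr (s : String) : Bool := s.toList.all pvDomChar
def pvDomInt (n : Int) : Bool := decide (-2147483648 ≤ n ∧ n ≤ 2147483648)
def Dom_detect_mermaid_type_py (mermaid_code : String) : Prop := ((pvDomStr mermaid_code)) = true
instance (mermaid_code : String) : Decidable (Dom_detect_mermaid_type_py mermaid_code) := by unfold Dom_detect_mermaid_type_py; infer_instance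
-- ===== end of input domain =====

-- B replaces A's ordered startswith cascade by an exact-match dictionary lookup on the four
-- possible prefix lengths (correct because the six headers are prefix-free), and finds the
-- first meaningful line by a staged map/filter/head instead of A's break-loop (alternative).


-- ===== PORT A =====
-- A's for-loop with break: first stripped, non-empty, non-"%%" line, else ""
def pvFirstLineA : List String → String
  | [] => ""
  | line :: rest =>
    let stripped := PySem.Str.strip line
    if stripped ≠ "" && !(PySem.Str.startswith stripped "%%") then stripped
    else pvFirstLineA rest

def detect_mermaid_type_py (mermaid_code : String) : String :=
  let first_line := pvFirstLineA (PySem.Str.splitlines mermaid_code)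
  let header := PySem.Str.lower first_line
  if PySem.Str.startswith header "sequencediagram" then "sequence"
  else if PySem.Str.startswith header "classdiagram" then "class"
  else if PySem.Str.startswith header "erdiagram" then "er"
  else if PySem.Str.startswith header "statediagram" then "state"
  else if PySem.Str.startswith header "graph" || PySem.Str.startswith header "flowchart" then "flowchart"
  else "unknown"

-- ===== PORT B =====
def pvKindByHeader : PySem.Dict String String :=
  PySem.Dict.ofList [("sequencediagram","sequence"),("classdiagram","class"),("erdiagram","er"),
                     ("statediagram","state"),("graph","flowchart"),("flowchart","flowchart")]

def pvPrefixLengths : List Int := [5, 9, 12, 15]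

-- B's for-loop over the slice lengths: first exact dict hit wins, else "unknown"
def pvLookupLoop (header : String) : List Int → String
  | [] => "unknown"
  | n :: rest =>
    match pvKindByHeader.get? (PySem.Str.slice header none (some n)) with
    | some kind => kind
    | none => pvLookupLoop header rest

def detect_mermaid_type_py_alt (mermaid_code : String) : String :=
  let meaningful := ((PySem.Str.splitlines mermaid_code).map PySem.Str.strip).filter
      (fun s => s ≠ "" && !(PySem.Str.startswith s "%%"))
  let header := PySem.Str.lower (meaningful.headD "")
  pvLookupLoop header pvPrefixLengths

-- ===== PRECONDITION & SPEC =====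
def Spec_detect_mermaid_type_py (mermaid_code : String) (out : String) : Prop := out = detect_mermaid_type_py_alt mermaid_code
instance (mermaid_code : String) (out : String) : Decidable (Spec_detect_mermaid_type_py mermaid_code out) := by unfold Spec_detect_mermaid_type_py; infer_instance

-- ===== CLAIM (what is proved, stated in full; the proofs are below) =====
def Claim_equal_detect_mermaid_type_py : Prop := ∀ (mermaid_code : String), Dom_detect_mermaid_type_py mermaid_code → Spec_detect_mermaid_type_py mermaid_code (detect_mermaid_type_py mermaid_code)

-- ===== LEMMAS AND PROOFS =====
-- A's break-loop equals B's map/filter/head over the stripped lines.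
lemma pvFirstLineA_eq_filter_head (ls : List String) :
    pvFirstLineA ls =
      (((ls.map PySem.Str.strip).filter (fun s => s ≠ "" && !(PySem.Str.startswith s "%%"))).headD "") := by
  induction ls with
  | nil => simp [pvFirstLineA]
  | cons l rest ih =>
    by_cases h : (PySem.Str.strip l ≠ "" && !(PySem.Str.startswith (PySem.Str.strip l) "%%")) = true <;>
      simp_all [pvFirstLineA]

-- a string slice s[:n] (0 ≤ n) equals a literal t once we know take n of the char list
lemma pvSlice_eq_lit (s t : String) (n : Int) (hn : 0 ≤ n)
    (ht : s.toList.take n.toNat = t.toList) : PySem.Str.slice s none (some n) = t := by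
  apply String.toList_inj.mp
  simpa [PySem.List.slice_to _ hn] using ht

lemma pvStartswith_iff (s p : String) :
    PySem.Str.startswith s p = true ↔ p.toList <+: s.toList := by
  simp [PySem.Chars.startswith_iff]

-- take L cannot equal p when p is not a prefix (p no longer than L)
lemma pvTake_ne_of_not_prefix (h p : List Char) (L : Nat) (hle : p.length ≤ L)
    (hnp : ¬ p <+: h) : h.take L ≠ p := by
  intro e
  apply hnp
  rw [List.prefix_iff_eq_take]
  have : (h.take L).take p.length = p.take p.length := by rw [e]
  simpa [List.take_take, Nat.min_eq_left hle] using this.symm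

-- take L cannot equal p when p is longer than L
lemma pvTake_ne_of_long (h p : List Char) (L : Nat) (hlt : L < p.length) : h.take L ≠ p := by
  intro e
  have := congrArg List.length e
  simp [List.length_take] at this
  omega

-- the dict misses every key that differs from all six headers
lemma pvGet?_none (k : String)
    (h1 : k ≠ "sequencediagram") (h2 : k ≠ "classdiagram") (h3 : k ≠ "erdiagram")
    (h4 : k ≠ "statediagram") (h5 : k ≠ "graph") (h6 : k ≠ "flowchart") :
    pvKindByHeader.get? k = none := by
  rw [PySem.Dict.get?_eq_none_iff_not_mem_keys]
  rw [show pvKindByHeader.keys = ["sequencediagram","classdiagram","erdiagram","statediagram","graph","flowchart"] from by decide]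
  simp [*]

-- a string slice s[:n] differs from p when take differs
lemma pvSlice_ne (s p : String) (n : Int) (hn : 0 ≤ n)
    (hne : s.toList.take n.toNat ≠ p.toList) : PySem.Str.slice s none (some n) ≠ p := by
  intro e
  apply hne
  have := congrArg String.toList e
  simpa [PySem.List.slice_to _ hn] using this

-- core: A's if-chain equals B's length-loop for every header string
lemma pvChain_eq_loop (header : String) :
    (if PySem.Str.startswith header "sequencediagram" then "sequence"
     else if PySem.Str.startswith header "classdiagram" then "class"
     else if PySem.Str.startswith header "erdiagram" then "er"
     else if PySem.Str.startswith header "statediagram" then "state"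
     else if PySem.Str.startswith header "graph" || PySem.Str.startswith header "flowchart" then "flowchart"
     else "unknown") = pvLookupLoop header pvPrefixLengths := by
  have take_of (L K : Nat) (p q : List Char) (hLK : L ≤ K) (hK : header.toList.take K = p)
      (hpq : p.take L = q) : header.toList.take L = q := by
    have h : header.toList.take L = (header.toList.take K).take L := by
      rw [List.take_take, Nat.min_eq_left hLK]
    rw [h, hK, hpq]
  by_cases hseq : PySem.Str.startswith header "sequencediagram" = true
  · have h15 : header.toList.take 15 = "sequencediagram".toList :=
      (List.prefix_iff_eq_take.mp ((pvStartswith_iff _ _).mp hseq)).symm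
    have s5 := pvSlice_eq_lit header "seque" 5 (by norm_num) (take_of 5 15 _ _ (by norm_num) h15 (by decide))
    have s9 := pvSlice_eq_lit header "sequenced" 9 (by norm_num) (take_of 9 15 _ _ (by norm_num) h15 (by decide))
    have s12 := pvSlice_eq_lit header "sequencediag" 12 (by norm_num) (take_of 12 15 _ _ (by norm_num) h15 (by decide))
    have s15 := pvSlice_eq_lit header "sequencediagram" 15 (by norm_num) h15
    rw [if_pos hseq]
    simp [pvLookupLoop, pvPrefixLengths, s5, s9, s12, s15,
      show pvKindByHeader.get? "seque" = none from by decide,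
      show pvKindByHeader.get? "sequenced" = none from by decide,
      show pvKindByHeader.get? "sequencediag" = none from by decide,
      show pvKindByHeader.get? "sequencediagram" = some "sequence" from by decide]
  · by_cases hclass : PySem.Str.startswith header "classdiagram" = true
    · have h12 : header.toList.take 12 = "classdiagram".toList :=
        (List.prefix_iff_eq_take.mp ((pvStartswith_iff _ _).mp hclass)).symm
      have s5 := pvSlice_eq_lit header "class" 5 (by norm_num) (take_of 5 12 _ _ (by norm_num) h12 (by decide))
      have s9 := pvSlice_eq_lit header "classdiag" 9 (by norm_num) (take_of 9 12 _ _ (by norm_num) h12 (by decide))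
      have s12 := pvSlice_eq_lit header "classdiagram" 12 (by norm_num) h12
      rw [if_neg hseq, if_pos hclass]
      simp [pvLookupLoop, pvPrefixLengths, s5, s9, s12,
        show pvKindByHeader.get? "class" = none from by decide,
        show pvKindByHeader.get? "classdiag" = none from by decide,
        show pvKindByHeader.get? "classdiagram" = some "class" from by decide]
    · by_cases her : PySem.Str.startswith header "erdiagram" = true
      · have h9 : header.toList.take 9 = "erdiagram".toList :=
          (List.prefix_iff_eq_take.mp ((pvStartswith_iff _ _).mp her)).symm
        have s5 := pvSlice_eq_lit header "erdia" 5 (by norm_num) (take_of 5 9 _ _ (by norm_num) h9 (by decide))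
        have s9 := pvSlice_eq_lit header "erdiagram" 9 (by norm_num) h9
        rw [if_neg hseq, if_neg hclass, if_pos her]
        simp [pvLookupLoop, pvPrefixLengths, s5, s9,
          show pvKindByHeader.get? "erdia" = none from by decide,
          show pvKindByHeader.get? "erdiagram" = some "er" from by decide]
      · by_cases hstate : PySem.Str.startswith header "statediagram" = true
        · have h12 : header.toList.take 12 = "statediagram".toList :=
            (List.prefix_iff_eq_take.mp ((pvStartswith_iff _ _).mp hstate)).symm
          have s5 := pvSlice_eq_lit header "state" 5 (by norm_num) (take_of 5 12 _ _ (by norm_num) h12 (by decide))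
          have s9 := pvSlice_eq_lit header "statediag" 9 (by norm_num) (take_of 9 12 _ _ (by norm_num) h12 (by decide))
          have s12 := pvSlice_eq_lit header "statediagram" 12 (by norm_num) h12
          rw [if_neg hseq, if_neg hclass, if_neg her, if_pos hstate]
          simp [pvLookupLoop, pvPrefixLengths, s5, s9, s12,
            show pvKindByHeader.get? "state" = none from by decide,
            show pvKindByHeader.get? "statediag" = none from by decide,
            show pvKindByHeader.get? "statediagram" = some "state" from by decide]
        · by_cases hgraph : PySem.Str.startswith header "graph" = true
          · have h5 : header.toList.take 5 = "graph".toList :=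
              (List.prefix_iff_eq_take.mp ((pvStartswith_iff _ _).mp hgraph)).symm
            have s5 := pvSlice_eq_lit header "graph" 5 (by norm_num) h5
            rw [if_neg hseq, if_neg hclass, if_neg her, if_neg hstate,
              if_pos (show (PySem.Str.startswith header "graph" || PySem.Str.startswith header "flowchart") = true by rw [hgraph]; rfl)]
            simp [pvLookupLoop, pvPrefixLengths, s5,
              show pvKindByHeader.get? "graph" = some "flowchart" from by decide]
          · by_cases hflow : PySem.Str.startswith header "flowchart" = true
            · have h9 : header.toList.take 9 = "flowchart".toList :=
                (List.prefix_iff_eq_take.mp ((pvStartswith_iff _ _).mp hflow)).symm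
              have s5 := pvSlice_eq_lit header "flowc" 5 (by norm_num) (take_of 5 9 _ _ (by norm_num) h9 (by decide))
              have s9 := pvSlice_eq_lit header "flowchart" 9 (by norm_num) h9
              rw [if_neg hseq, if_neg hclass, if_neg her, if_neg hstate,
                if_pos (show (PySem.Str.startswith header "graph" || PySem.Str.startswith header "flowchart") = true by rw [hflow, Bool.or_true])]
              simp [pvLookupLoop, pvPrefixLengths, s5, s9,
                show pvKindByHeader.get? "flowc" = none from by decide,
                show pvKindByHeader.get? "flowchart" = some "flowchart" from by decide]
            · -- no header matches: every lookup misses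
              have nseq : ¬ ("sequencediagram".toList <+: header.toList) :=
                fun hp => hseq ((pvStartswith_iff _ _).mpr hp)
              have nclass : ¬ ("classdiagram".toList <+: header.toList) :=
                fun hp => hclass ((pvStartswith_iff _ _).mpr hp)
              have ner : ¬ ("erdiagram".toList <+: header.toList) :=
                fun hp => her ((pvStartswith_iff _ _).mpr hp)
              have nstate : ¬ ("statediagram".toList <+: header.toList) :=
                fun hp => hstate ((pvStartswith_iff _ _).mpr hp)
              have ngraph : ¬ ("graph".toList <+: header.toList) :=
                fun hp => hgraph ((pvStartswith_iff _ _).mpr hp)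
              have nflow : ¬ ("flowchart".toList <+: header.toList) :=
                fun hp => hflow ((pvStartswith_iff _ _).mpr hp)
              have g5 : pvKindByHeader.get? (PySem.Str.slice header none (some 5)) = none :=
                pvGet?_none _
                  (pvSlice_ne _ _ 5 (by norm_num) (pvTake_ne_of_long _ _ _ (by decide)))
                  (pvSlice_ne _ _ 5 (by norm_num) (pvTake_ne_of_long _ _ _ (by decide)))
                  (pvSlice_ne _ _ 5 (by norm_num) (pvTake_ne_of_long _ _ _ (by decide)))
                  (pvSlice_ne _ _ 5 (by norm_num) (pvTake_ne_of_long _ _ _ (by decide)))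
                  (pvSlice_ne _ _ 5 (by norm_num) (pvTake_ne_of_not_prefix _ _ _ (by decide) ngraph))
                  (pvSlice_ne _ _ 5 (by norm_num) (pvTake_ne_of_long _ _ _ (by decide)))
              have g9 : pvKindByHeader.get? (PySem.Str.slice header none (some 9)) = none :=
                pvGet?_none _
                  (pvSlice_ne _ _ 9 (by norm_num) (pvTake_ne_of_long _ _ _ (by decide)))
                  (pvSlice_ne _ _ 9 (by norm_num) (pvTake_ne_of_long _ _ _ (by decide)))
                  (pvSlice_ne _ _ 9 (by norm_num) (pvTake_ne_of_not_prefix _ _ _ (by decide) ner))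
                  (pvSlice_ne _ _ 9 (by norm_num) (pvTake_ne_of_long _ _ _ (by decide)))
                  (pvSlice_ne _ _ 9 (by norm_num) (pvTake_ne_of_not_prefix _ _ _ (by decide) ngraph))
                  (pvSlice_ne _ _ 9 (by norm_num) (pvTake_ne_of_not_prefix _ _ _ (by decide) nflow))
              have g12 : pvKindByHeader.get? (PySem.Str.slice header none (some 12)) = none :=
                pvGet?_none _
                  (pvSlice_ne _ _ 12 (by norm_num) (pvTake_ne_of_long _ _ _ (by decide)))
                  (pvSlice_ne _ _ 12 (by norm_num) (pvTake_ne_of_not_prefix _ _ _ (by decide) nclass))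
                  (pvSlice_ne _ _ 12 (by norm_num) (pvTake_ne_of_not_prefix _ _ _ (by decide) ner))
                  (pvSlice_ne _ _ 12 (by norm_num) (pvTake_ne_of_not_prefix _ _ _ (by decide) nstate))
                  (pvSlice_ne _ _ 12 (by norm_num) (pvTake_ne_of_not_prefix _ _ _ (by decide) ngraph))
                  (pvSlice_ne _ _ 12 (by norm_num) (pvTake_ne_of_not_prefix _ _ _ (by decide) nflow))
              have g15 : pvKindByHeader.get? (PySem.Str.slice header none (some 15)) = none :=
                pvGet?_none _
                  (pvSlice_ne _ _ 15 (by norm_num) (pvTake_ne_of_not_prefix _ _ _ (by decide) nseq))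
                  (pvSlice_ne _ _ 15 (by norm_num) (pvTake_ne_of_not_prefix _ _ _ (by decide) nclass))
                  (pvSlice_ne _ _ 15 (by norm_num) (pvTake_ne_of_not_prefix _ _ _ (by decide) ner))
                  (pvSlice_ne _ _ 15 (by norm_num) (pvTake_ne_of_not_prefix _ _ _ (by decide) nstate))
                  (pvSlice_ne _ _ 15 (by norm_num) (pvTake_ne_of_not_prefix _ _ _ (by decide) ngraph))
                  (pvSlice_ne _ _ 15 (by norm_num) (pvTake_ne_of_not_prefix _ _ _ (by decide) nflow))
              rw [if_neg hseq, if_neg hclass, if_neg her, if_neg hstate,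
                if_neg (show ¬ (PySem.Str.startswith header "graph" || PySem.Str.startswith header "flowchart") = true by simp only [Bool.or_eq_true, not_or]; exact ⟨hgraph, hflow⟩)]
              simp [pvLookupLoop, pvPrefixLengths, g5, g9, g12, g15]

-- ===== VERDICT (by name: the statement is the Claim_ definition above) =====
theorem detect_mermaid_type_py_spec : Claim_equal_detect_mermaid_type_py := by
  intro mc _
  unfold Spec_detect_mermaid_type_py detect_mermaid_type_py detect_mermaid_type_py_alt
  rw [pvFirstLineA_eq_filter_head]
  exact pvChain_eq_loop _
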